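-- pv_equiv track=rewrite | github.com/tonyyo/- | Python算法指南/49_子矩阵和为0_巧用和矩阵和循环_背.py | submatrixSum2
-- ===== SOURCE A (Python) =====
-- def submatrixSum2(matrix):
--     if not matrix:
--         return []
--     wide = len(matrix[0])
--     depth = len(matrix)  # 这样表示二维列表的长度清晰可见
--     res = None
--     prefixsum = [[0 for j in range(wide + 1)] for i in range(depth + 1)]
--     for dy in range(1, depth + 1):
--         for dx in range(1, wide + 1):
--             prefixsum[dy][dx] = prefixsum[dy - 1][dx] + prefixsum[dy][dx - 1] - prefixsum[dy - 1][dx - 1] + \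
--                                 matrix[dy - 1][dx - 1]  # 求和矩阵
--             for y in range(dy):
--                 for x in range(dx):
--                     if prefixsum[dy][dx] == prefixsum[dy][x] + prefixsum[y][dx] - prefixsum[y][x]:  # 利用和矩阵求不同子矩阵的和
--                         res = [(y, x), (dy - 1, dx - 1)]
--                         return res
-- ===== SOURCE B (Python) =====
-- def submatrixSum2(matrix):
--     if not matrix:
--         return []
--     wide = len(matrix[0])
--     depth = len(matrix)
--     # full 2D prefix-sum table: pref[r][c] = sum of matrix[:r], columns [:c]
--     pref = [[0] * (wide + 1)]
--     for r in range(depth):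
--         run = 0
--         row = [0]
--         prev = pref[r]
--         for c in range(wide):
--             run += matrix[r][c]
--             row.append(prev[c + 1] + run)
--         pref.append(row)
--     for dy in range(1, depth + 1):
--         # seen[y]: band-sum of rows y..dy-1 over columns [:x]  ->  least such x
--         seen = [{0: 0} for _ in range(dy)]
--         for dx in range(1, wide + 1):
--             for y in range(dy):
--                 band = pref[dy][dx] - pref[y][dx]
--                 d = seen[y]
--                 if band in d:
--                     return [(y, d[band]), (dy - 1, dx - 1)]
--                 d[band] = dx
--     return None
-- ===== Notes on version B (the rewrite author's own statement) =====
-- stated objective: faster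
-- what changed: B builds the full 2D prefix-sum table once (row running sums), then for each bottom row dy keeps one hash map per top row y from band-sum to its least column, so the inner column scan of A disappears; A recomputes and rescans all O(W) left columns for every (dy,dx,y).
-- outside the precondition, e.g. on submatrixSum2([[0, 1], [5]]): A returns [(0, 0), (0, 0)], B raises IndexError
import Mathlib
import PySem

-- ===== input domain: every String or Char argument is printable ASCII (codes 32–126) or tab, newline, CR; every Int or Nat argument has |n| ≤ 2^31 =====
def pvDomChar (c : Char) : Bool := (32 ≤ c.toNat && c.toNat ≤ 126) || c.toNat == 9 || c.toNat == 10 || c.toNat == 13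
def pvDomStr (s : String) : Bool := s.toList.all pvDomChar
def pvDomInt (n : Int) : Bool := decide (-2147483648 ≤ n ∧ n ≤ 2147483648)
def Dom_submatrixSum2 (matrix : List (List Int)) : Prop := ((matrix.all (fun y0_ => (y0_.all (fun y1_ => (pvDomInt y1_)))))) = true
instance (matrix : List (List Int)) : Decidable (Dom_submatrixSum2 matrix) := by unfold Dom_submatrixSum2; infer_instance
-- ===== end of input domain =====

-- B replaces A's innermost column rescans by one 2D prefix-sum table built once plus, per bottom
-- row, one hash map per top row from band-sum to its least column (objective: faster, measured).

-- ===== PORT A =====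
-- prefixsum[r][c] read / write (indices are in range wherever Python A reads or writes)
def pvAget (pre : List (List Int)) (r c : Nat) : Int := (pre.getD r []).getD c 0
def pvAset (pre : List (List Int)) (r c : Nat) (v : Int) : List (List Int) :=
  pre.set r ((pre.getD r []).set c v)

-- the two innermost loops: 'for y in range(dy): for x in range(dx): if …: return (y, x)'
def pvAinner (pre : List (List Int)) (dy dx : Nat) : Option (Nat × Nat) :=
  (List.range dy).findSome? (fun y =>
    ((List.range dx).find? (fun x =>
      pvAget pre dy dx == pvAget pre dy x + pvAget pre y dx - pvAget pre y x)).map (fun x => (y, x)))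

def pvAdxLoop (m : List (List Int)) (dy : Nat) :
    List Nat → List (List Int) → List (List Int) × Option (List (Int × Int))
  | [], pre => (pre, none)
  | dx :: rest, pre =>
    let v := pvAget pre (dy-1) dx + pvAget pre dy (dx-1) - pvAget pre (dy-1) (dx-1) +
             (m.getD (dy-1) []).getD (dx-1) 0
    let pre' := pvAset pre dy dx v
    match pvAinner pre' dy dx with
    | some (y, x) => (pre', some [((y : Int), (x : Int)), ((dy : Int) - 1, (dx : Int) - 1)])
    | none => pvAdxLoop m dy rest pre'

def pvAdyLoop (m : List (List Int)) (wide : Nat) :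
    List Nat → List (List Int) → Option (List (Int × Int))
  | [], _ => none
  | dy :: rest, pre =>
    let r := pvAdxLoop m dy (List.range' 1 wide) pre
    match r.2 with
    | some res => some res
    | none => pvAdyLoop m wide rest r.1

def submatrixSum2 (matrix : List (List Int)) : Option (List (Int × Int)) :=
  if matrix = [] then some [] else
  let wide := (matrix.headD []).length
  let depth := matrix.length
  let prefixsum := List.replicate (depth+1) (List.replicate (wide+1) (0:Int))
  pvAdyLoop matrix wide (List.range' 1 depth) prefixsum

-- ===== PORT B =====
-- pref[r][c] read
def pvBget (pref : List (List Int)) (r c : Nat) : Int := (pref.getD r []).getD c 0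

-- 'for c in range(wide): run += matrix[r][c]; row.append(prev[c+1] + run)'
def pvBrowLoop (prev mrow : List Int) : List Nat → Int → List Int
  | [], _ => []
  | c :: rest, run =>
    let run' := run + mrow.getD c 0
    (prev.getD (c+1) 0 + run') :: pvBrowLoop prev mrow rest run'

def pvBprefLoop (m : List (List Int)) (wide : Nat) :
    List Nat → List (List Int) → List (List Int)
  | [], pref => pref
  | r :: rest, pref =>
    let prev := pref.getD r []
    let row := (0 : Int) :: pvBrowLoop prev (m.getD r []) (List.range wide) 0
    pvBprefLoop m wide rest (pref ++ [row])

-- 'for y in range(dy): band = …; d = seen[y]; if band in d: return …; d[band] = dx'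
def pvByLoop (pref : List (List Int)) (dy dx : Nat) :
    List Nat → List (PySem.Dict Int Int) → List (PySem.Dict Int Int) × Option (Int × Int)
  | [], seen => (seen, none)
  | y :: rest, seen =>
    let band := pvBget pref dy dx - pvBget pref y dx
    let d := seen.getD y PySem.Dict.empty
    if d.contains band then (seen, some ((y : Int), d.getD band 0))
    else pvByLoop pref dy dx rest (seen.set y (d.insert band (dx : Int)))

def pvBdxLoop (pref : List (List Int)) (dy : Nat) :
    List Nat → List (PySem.Dict Int Int) → Option (List (Int × Int))
  | [], _ => none
  | dx :: rest, seen =>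
    let r := pvByLoop pref dy dx (List.range dy) seen
    match r.2 with
    | some (y, x) => some [(y, x), ((dy : Int) - 1, (dx : Int) - 1)]
    | none => pvBdxLoop pref dy rest r.1

def pvBdyLoop (pref : List (List Int)) (wide : Nat) : List Nat → Option (List (Int × Int))
  | [] => none
  | dy :: rest =>
    let seen := List.replicate dy (PySem.Dict.empty.insert (0 : Int) (0 : Int))
    match pvBdxLoop pref dy (List.range' 1 wide) seen with
    | some res => some res
    | none => pvBdyLoop pref wide rest

def submatrixSum2_alt (matrix : List (List Int)) : Option (List (Int × Int)) :=
  if matrix = [] then some [] else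
  let wide := (matrix.headD []).length
  let depth := matrix.length
  let pref := pvBprefLoop matrix wide (List.range depth) [List.replicate (wide+1) (0:Int)]
  pvBdyLoop pref wide (List.range' 1 depth)

-- ===== PRECONDITION & SPEC =====
-- Pre_ excludes ragged matrices with a row shorter than the first row: Python B always raises
-- IndexError there (it builds the whole prefix table first), while Python A raises too except
-- when it finds a zero-sum submatrix before first touching the short row.
def Pre_submatrixSum2 (matrix : List (List Int)) : Prop :=
  ∀ row ∈ matrix, (matrix.headD []).length ≤ row.length
instance (matrix : List (List Int)) : Decidable (Pre_submatrixSum2 matrix) := by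
  unfold Pre_submatrixSum2; infer_instance
def pvWitness_submatrixSum2 : List (List Int) := [[1, 2], [3, -3]]

def Spec_submatrixSum2 (matrix : List (List Int)) (out : Option (List (Int × Int))) : Prop := out = submatrixSum2_alt matrix
instance (matrix : List (List Int)) (out : Option (List (Int × Int))) : Decidable (Spec_submatrixSum2 matrix out) := by unfold Spec_submatrixSum2; infer_instance

-- ===== CLAIM (what is proved, stated in full; the proofs are below) =====
def Claim_equal_submatrixSum2 : Prop := ∀ (matrix : List (List Int)), Dom_submatrixSum2 matrix → Pre_submatrixSum2 matrix → Spec_submatrixSum2 matrix (submatrixSum2 matrix)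

-- ===== LEMMAS AND PROOFS =====

-- generic list facts used by both sides
theorem pvTakeSuccSum (l : List Int) (n : Nat) :
    (l.take (n+1)).sum = (l.take n).sum + l.getD n 0 := by
  rw [List.take_add_one]
  cases h : l[n]? <;> simp [List.getD, h]

theorem pvGetDSet {α : Type} (l : List α) (n m : Nat) (v d : α) (h : n < l.length) :
    (l.set n v).getD m d = if m = n then v else l.getD m d := by
  simp only [List.getD, List.getElem?_set]
  split
  · next he => subst he; simp
  · next hne => rw [if_neg (fun h' => hne h'.symm)]

theorem pvGetDMapRange {α : Type} (f : Nat → α) (n r : Nat) (d : α) (h : r < n) :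
    ((List.range n).map f).getD r d = f r := by
  simp [List.getD, h]

theorem pvFindCongr {α : Type} (l : List α) (p q : α → Bool) (h : ∀ a ∈ l, p a = q a) :
    l.find? p = l.find? q := by
  induction l with
  | nil => rfl
  | cons a t ih =>
    rw [List.find?_cons, List.find?_cons, h a (List.mem_cons_self ..)]
    cases q a <;> simp [ih (fun b hb => h b (List.mem_cons_of_mem _ hb))]

theorem pvFindSomeCongr {α β : Type} (l : List α) (f g : α → Option β) (h : ∀ a ∈ l, f a = g a) :
    l.findSome? f = l.findSome? g := by
  induction l with
  | nil => rfl
  | cons a t ih =>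
    rw [List.findSome?_cons, List.findSome?_cons, h a (List.mem_cons_self ..)]
    cases g a <;> simp [ih (fun b hb => h b (List.mem_cons_of_mem _ hb))]

-- mathematical 2D prefix sums and the zero-sum-submatrix predicate
def pvPs (m : List (List Int)) : Nat → Nat → Int
  | 0, _ => 0
  | y+1, x => pvPs m y x + ((m.getD y []).take x).sum

theorem pvPsZero (m : List (List Int)) (y : Nat) : pvPs m y 0 = 0 := by
  induction y with
  | zero => rfl
  | succ y ih => simp [pvPs, ih]

theorem pvPsRec (m : List (List Int)) (y x : Nat) :
    pvPs m (y+1) (x+1) =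
      pvPs m y (x+1) + pvPs m (y+1) x - pvPs m y x + (m.getD y []).getD x 0 := by
  simp only [pvPs, pvTakeSuccSum]
  ring

def pvP (m : List (List Int)) (dy dx y x : Nat) : Bool :=
  pvPs m dy dx == pvPs m dy x + pvPs m y dx - pvPs m y x

-- first (y, x) for a fixed bottom-right corner (dy, dx), in A's scan order
def pvS (m : List (List Int)) (dy dx : Nat) : Option (Nat × Nat) :=
  (List.range dy).findSome? (fun y =>
    ((List.range dx).find? (fun x => pvP m dy dx y x)).map (fun x => (y, x)))

-- the common specification: first hit in (dy, dx, y, x) lexicographic scan order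
def pvHit (m : List (List Int)) : Option (List (Int × Int)) :=
  (List.range' 1 m.length).findSome? (fun dy =>
    (List.range' 1 (m.headD []).length).findSome? (fun dx =>
      (pvS m dy dx).map (fun p => [((p.1 : Int), (p.2 : Int)), ((dy : Int) - 1, (dx : Int) - 1)])))

-- ---------- A-side ----------

def pvFilled (m : List (List Int)) (pre : List (List Int)) (dy dx0 : Nat) : Prop :=
  pre.length = m.length + 1 ∧
  (∀ r, r ≤ m.length → (pre.getD r []).length = (m.headD []).length + 1) ∧
  (∀ r c, r ≤ m.length → c ≤ (m.headD []).length →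
    (r < dy ∨ (r = dy ∧ c < dx0) ∨ c = 0) → pvAget pre r c = pvPs m r c)

theorem pvAgetSet (pre : List (List Int)) (a b r c : Nat) (v : Int)
    (h1 : a < pre.length) (h2 : b < (pre.getD a []).length) :
    pvAget (pvAset pre a b v) r c = if r = a ∧ c = b then v else pvAget pre r c := by
  unfold pvAget pvAset
  rw [pvGetDSet _ a r _ _ h1]
  by_cases hr : r = a
  · subst hr
    rw [if_pos rfl, pvGetDSet _ b c _ _ h2]
    by_cases hc : c = b <;> simp [hc]
  · simp [hr]

theorem pvAinnerEq (m pre : List (List Int)) (dy dx : Nat)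
    (hdy : dy ≤ m.length) (hdx : dx ≤ (m.headD []).length)
    (h : ∀ r c, r ≤ m.length → c ≤ (m.headD []).length →
      (r < dy ∨ (r = dy ∧ c ≤ dx)) → pvAget pre r c = pvPs m r c) :
    pvAinner pre dy dx = pvS m dy dx := by
  unfold pvAinner pvS
  apply pvFindSomeCongr
  intro y hy
  have hy' : y < dy := List.mem_range.1 hy
  congr 1
  apply pvFindCongr
  intro x hx
  have hx' : x < dx := List.mem_range.1 hx
  unfold pvP
  rw [h dy dx hdy hdx (Or.inr ⟨rfl, le_refl _⟩),
      h dy x hdy (by omega) (Or.inr ⟨rfl, by omega⟩),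
      h y dx (by omega) hdx (Or.inl hy'),
      h y x (by omega) (by omega) (Or.inl hy')]

theorem pvAdxSpec (m : List (List Int)) (dy : Nat) (hdy1 : 1 ≤ dy) (hdy2 : dy ≤ m.length) :
    ∀ (k dx0 : Nat) (pre : List (List Int)), 1 ≤ dx0 → dx0 + k = (m.headD []).length + 1 →
    pvFilled m pre dy dx0 →
    (pvAdxLoop m dy (List.range' dx0 k) pre).2
      = (List.range' dx0 k).findSome? (fun dx =>
          (pvS m dy dx).map (fun p => [((p.1 : Int), (p.2 : Int)), ((dy : Int) - 1, (dx : Int) - 1)]))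
    ∧ ((pvAdxLoop m dy (List.range' dx0 k) pre).2 = none →
        pvFilled m (pvAdxLoop m dy (List.range' dx0 k) pre).1 dy (dx0 + k)) := by
  intro k
  induction k with
  | zero =>
    intro dx0 pre h1 h2 hF
    simp [pvAdxLoop, hF]
  | succ k ih =>
    intro dx0 pre h1 h2 hF
    obtain ⟨hL, hRow, hVal⟩ := hF
    have hdx0W : dx0 ≤ (m.headD []).length := by omega
    obtain ⟨a, ha⟩ : ∃ a, dy = a + 1 := ⟨dy - 1, by omega⟩
    obtain ⟨b, hb⟩ : ∃ b, dx0 = b + 1 := ⟨dx0 - 1, by omega⟩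
    rw [List.range'_succ]
    simp only [pvAdxLoop]
    have hvv : pvAget pre (dy-1) dx0 + pvAget pre dy (dx0-1) - pvAget pre (dy-1) (dx0-1) +
        (m.getD (dy-1) []).getD (dx0-1) 0 = pvPs m dy dx0 := by
      rw [hVal (dy-1) dx0 (by omega) hdx0W (by omega),
          hVal dy (dx0-1) (by omega) (by omega) (by omega),
          hVal (dy-1) (dx0-1) (by omega) (by omega) (by omega)]
      subst ha hb
      simp only [Nat.add_sub_cancel]
      rw [pvPsRec m a b]
    set v := pvAget pre (dy-1) dx0 + pvAget pre dy (dx0-1) - pvAget pre (dy-1) (dx0-1) +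
        (m.getD (dy-1) []).getD (dx0-1) 0 with hv
    set pre' := pvAset pre dy dx0 v with hpre'
    have hdyL : dy < pre.length := by omega
    have hdxL : dx0 < (pre.getD dy []).length := by rw [hRow dy hdy2]; omega
    have hget' : ∀ r c, pvAget pre' r c = if r = dy ∧ c = dx0 then v else pvAget pre r c :=
      fun r c => pvAgetSet pre dy dx0 r c v hdyL hdxL
    have hF' : pvFilled m pre' dy (dx0+1) := by
      refine ⟨?_, ?_, ?_⟩
      · rw [hpre']; unfold pvAset; rw [List.length_set]; exact hL
      · intro r hr
        rw [hpre']; unfold pvAset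
        rw [pvGetDSet _ dy r _ _ hdyL]
        by_cases hrd : r = dy
        · rw [if_pos hrd, List.length_set]
          exact hRow dy hdy2
        · rw [if_neg hrd]; exact hRow r hr
      · intro r c hr hc hcl
        rw [hget' r c]
        by_cases he : r = dy ∧ c = dx0
        · rw [if_pos he, he.1, he.2]
          exact hvv
        · rw [if_neg he]
          apply hVal r c hr hc
          rcases hcl with h' | ⟨hrr, hclt⟩ | h'
          · exact Or.inl h'
          · by_cases hcb : c = dx0
            · exact absurd ⟨hrr, hcb⟩ he
            · exact Or.inr (Or.inl ⟨hrr, by omega⟩)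
          · exact Or.inr (Or.inr h')
    have hInner : pvAinner pre' dy dx0 = pvS m dy dx0 := by
      apply pvAinnerEq m pre' dy dx0 hdy2 hdx0W
      intro r c hr hc hcl
      have := hF'.2.2 r c hr hc
      apply this
      rcases hcl with h' | ⟨he, hcle⟩
      · exact Or.inl h'
      · exact Or.inr (Or.inl ⟨he, by omega⟩)
    rw [hInner]
    rw [List.findSome?_cons]
    cases hS : pvS m dy dx0 with
    | some p =>
      obtain ⟨y, x⟩ := p
      simp
    | none =>
      simp only []
      have h2' : (dx0 + 1) + k = (m.headD []).length + 1 := by omega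
      have := ih (dx0+1) pre' (by omega) h2' hF'
      refine ⟨this.1, ?_⟩
      intro hn
      have : dx0 + (k + 1) = (dx0 + 1) + k := by omega
      rw [this]
      exact (ih (dx0+1) pre' (by omega) h2' hF').2 hn

theorem pvFilledNext (m : List (List Int)) (pre : List (List Int)) (dy : Nat)
    (h : pvFilled m pre dy ((m.headD []).length + 1)) : pvFilled m pre (dy+1) 1 := by
  obtain ⟨hL, hRow, hVal⟩ := h
  refine ⟨hL, hRow, ?_⟩
  intro r c hr hc hcl
  apply hVal r c hr hc
  rcases hcl with h' | ⟨he, hclt⟩ | h'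
  · by_cases hrd : r = dy
    · exact Or.inr (Or.inl ⟨hrd, by omega⟩)
    · exact Or.inl (by omega)
  · exact Or.inr (Or.inr (by omega))
  · exact Or.inr (Or.inr h')

theorem pvAdySpec (m : List (List Int)) :
    ∀ (k dy0 : Nat) (pre : List (List Int)), 1 ≤ dy0 → dy0 + k = m.length + 1 →
    pvFilled m pre dy0 1 →
    pvAdyLoop m (m.headD []).length (List.range' dy0 k) pre
      = (List.range' dy0 k).findSome? (fun dy =>
          (List.range' 1 (m.headD []).length).findSome? (fun dx =>
            (pvS m dy dx).map (fun p => [((p.1 : Int), (p.2 : Int)), ((dy : Int) - 1, (dx : Int) - 1)]))) := by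
  intro k
  induction k with
  | zero => intro dy0 pre _ _ _; rfl
  | succ k ih =>
    intro dy0 pre h1 h2 hF
    rw [List.range'_succ]
    simp only [pvAdyLoop]
    have hdx := pvAdxSpec m dy0 h1 (by omega) (m.headD []).length 1 pre (le_refl _) (by omega) hF
    rw [List.findSome?_cons, hdx.1]
    cases hF2 : (List.range' 1 (m.headD []).length).findSome? (fun dx =>
        (pvS m dy0 dx).map (fun p => [((p.1 : Int), (p.2 : Int)), ((dy0 : Int) - 1, (dx : Int) - 1)])) with
    | some r => rfl
    | none =>
      have hnone : (pvAdxLoop m dy0 (List.range' 1 (m.headD []).length) pre).2 = none := by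
        rw [hdx.1, hF2]
      have hF1 := hdx.2 hnone
      rw [Nat.add_comm 1 ((m.headD []).length)] at hF1
      exact ih (dy0+1) _ (by omega) (by omega) (pvFilledNext m _ dy0 hF1)

theorem pvAEqHit (m : List (List Int)) (hm : m ≠ []) : submatrixSum2 m = pvHit m := by
  unfold submatrixSum2 pvHit
  rw [if_neg hm]
  have hdep : 1 ≤ m.length := by
    cases m with
    | nil => exact absurd rfl hm
    | cons a t => simp
  apply pvAdySpec m m.length 1 _ (le_refl _) (by omega)
  refine ⟨by simp, ?_, ?_⟩
  · intro r hr
    rw [List.getD, List.getElem?_replicate, if_pos (by omega)]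
    simp
  · intro r c hr hc hcl
    have hz : pvAget (List.replicate (m.length + 1) (List.replicate ((m.headD []).length + 1) (0:Int))) r c = 0 := by
      unfold pvAget
      have houter : (List.replicate (m.length + 1)
          (List.replicate ((m.headD []).length + 1) (0:Int))).getD r []
          = List.replicate ((m.headD []).length + 1) (0:Int) := by
        rw [List.getD, List.getElem?_replicate, if_pos (by omega)]
        rfl
      rw [houter, List.getD, List.getElem?_replicate, if_pos (by omega)]
      rfl
    rw [hz]
    rcases hcl with h' | ⟨he, hclt⟩ | h'
    · have : r = 0 := by omega
      subst this; rfl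
    · have : c = 0 := by omega
      subst this; rw [pvPsZero]
    · subst h'; rw [pvPsZero]

-- ---------- B-side ----------

def pvProw (m : List (List Int)) (r : Nat) : List Int :=
  (List.range ((m.headD []).length + 1)).map (fun c => pvPs m r c)

theorem pvProwGetD (m : List (List Int)) (r c : Nat) (h : c ≤ (m.headD []).length) :
    (pvProw m r).getD c 0 = pvPs m r c := by
  unfold pvProw
  exact pvGetDMapRange _ _ _ _ (by omega)

theorem pvBrowSpec (prev mrow : List Int) :
    ∀ (k c0 : Nat), pvBrowLoop prev mrow (List.range' c0 k) ((mrow.take c0).sum)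
      = (List.range' c0 k).map (fun c => prev.getD (c+1) 0 + (mrow.take (c+1)).sum) := by
  intro k
  induction k with
  | zero => intro c0; rfl
  | succ k ih =>
    intro c0
    rw [List.range'_succ]
    simp only [pvBrowLoop, List.map_cons]
    have hrun : (mrow.take c0).sum + mrow.getD c0 0 = (mrow.take (c0+1)).sum :=
      (pvTakeSuccSum mrow c0).symm
    rw [hrun, ih (c0+1)]

theorem pvBrowFull (m : List (List Int)) (r : Nat) :
    (0 : Int) :: pvBrowLoop (pvProw m r) (m.getD r []) (List.range (m.headD []).length) 0
      = pvProw m (r+1) := by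
  rw [List.range_eq_range']
  have h0 : ((m.getD r []).take 0).sum = 0 := by simp
  rw [← h0, pvBrowSpec (pvProw m r) (m.getD r []) (m.headD []).length 0]
  have hmap : (List.range' 0 (m.headD []).length).map
      (fun c => (pvProw m r).getD (c+1) 0 + ((m.getD r []).take (c+1)).sum)
      = (List.range' 0 (m.headD []).length).map (fun c => pvPs m (r+1) (c+1)) := by
    apply List.map_congr_left
    intro c hc
    have hc' : c < (m.headD []).length := by
      have := List.mem_range'_1.1 hc; omega
    rw [pvProwGetD m r (c+1) (by omega)]
    simp [pvPs]
  rw [hmap]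
  unfold pvProw
  rw [List.range_succ_eq_map]
  simp only [List.map_cons, List.map_map]
  rw [pvPsZero, List.range_eq_range']
  rfl

theorem pvBprefSpec (m : List (List Int)) :
    ∀ (k r0 : Nat) (acc : List (List Int)), acc = (List.range (r0+1)).map (pvProw m) →
    r0 + k = m.length →
    pvBprefLoop m (m.headD []).length (List.range' r0 k) acc
      = (List.range (m.length+1)).map (pvProw m) := by
  intro k
  induction k with
  | zero =>
    intro r0 acc ha h
    have : r0 = m.length := by omega
    subst this; subst ha; rfl
  | succ k ih =>
    intro r0 acc ha h
    rw [List.range'_succ]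
    simp only [pvBprefLoop]
    have hprev : acc.getD r0 [] = pvProw m r0 := by
      rw [ha]; exact pvGetDMapRange _ _ _ _ (by omega)
    rw [hprev, pvBrowFull m r0]
    apply ih (r0+1) _ _ (by omega)
    rw [ha]
    simp [List.range_succ]

theorem pvPrefGet (m : List (List Int)) (r c : Nat) (hr : r ≤ m.length)
    (hc : c ≤ (m.headD []).length) :
    pvBget ((List.range (m.length+1)).map (pvProw m)) r c = pvPs m r c := by
  unfold pvBget
  rw [pvGetDMapRange _ _ _ _ (by omega)]
  exact pvProwGetD m r c hc

-- band sums and the dictionary contents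
def pvBand (m : List (List Int)) (dy y c : Nat) : Int := pvPs m dy c - pvPs m y c

def pvBD (m : List (List Int)) (dy y : Nat) : Nat → PySem.Dict Int Int
  | 0 => PySem.Dict.empty
  | dx+1 =>
    if (pvBD m dy y dx).contains (pvBand m dy y dx) then pvBD m dy y dx
    else (pvBD m dy y dx).insert (pvBand m dy y dx) (dx : Int)

theorem pvPBand (m : List (List Int)) (dy dx y x : Nat) :
    pvP m dy dx y x = (pvBand m dy y x == pvBand m dy y dx) := by
  by_cases h : pvPs m dy dx = pvPs m dy x + pvPs m y dx - pvPs m y x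
  · have h' : pvBand m dy y x = pvBand m dy y dx := by unfold pvBand; omega
    simp [pvP, h, h']
  · have h' : pvBand m dy y x ≠ pvBand m dy y dx := by unfold pvBand; omega
    simp [pvP, h, h']

theorem pvBDSuccPos (m : List (List Int)) (dy y dx : Nat)
    (h : (pvBD m dy y dx).contains (pvBand m dy y dx) = true) :
    pvBD m dy y (dx+1) = pvBD m dy y dx := by
  simp only [pvBD]; rw [if_pos h]

theorem pvBDSuccNeg (m : List (List Int)) (dy y dx : Nat)
    (h : ¬ ((pvBD m dy y dx).contains (pvBand m dy y dx) = true)) :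
    pvBD m dy y (dx+1) = (pvBD m dy y dx).insert (pvBand m dy y dx) (dx : Int) := by
  simp only [pvBD]; rw [if_neg h]

theorem pvBDGet (m : List (List Int)) (dy y : Nat) :
    ∀ (dx : Nat) (v : Int), (pvBD m dy y dx).get? v
      = ((List.range dx).find? (fun c => pvBand m dy y c == v)).map (fun c => (c : Int)) := by
  intro dx
  induction dx with
  | zero => intro v; simp [pvBD, PySem.Dict.get?_empty]
  | succ dx ih =>
    intro v
    rw [List.range_succ, List.find?_append]
    have hcont := PySem.Dict.contains_eq_isSome_get? (d := pvBD m dy y dx) (k := pvBand m dy y dx)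
    by_cases h : (pvBD m dy y dx).contains (pvBand m dy y dx) = true
    · rw [pvBDSuccPos m dy y dx h, ih v]
      have hsome : ((List.range dx).find? (fun c => pvBand m dy y c == pvBand m dy y dx)).isSome := by
        rw [hcont, ih (pvBand m dy y dx)] at h
        cases hg : (List.range dx).find? (fun c => pvBand m dy y c == pvBand m dy y dx) with
        | none => rw [hg] at h; simp at h
        | some c => simp
      cases hf : (List.range dx).find? (fun c => pvBand m dy y c == v) with
      | some c => simp
      | none =>
        have hne : (pvBand m dy y dx == v) = false := by
          rw [beq_eq_false_iff_ne]
          intro he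
          rw [he, hf] at hsome
          simp at hsome
        simp [hne]
    · have hnone : (List.range dx).find? (fun c => pvBand m dy y c == pvBand m dy y dx) = none := by
        rw [hcont, ih (pvBand m dy y dx)] at h
        cases hg : (List.range dx).find? (fun c => pvBand m dy y c == pvBand m dy y dx) with
        | none => rfl
        | some c => rw [hg] at h; simp at h
      rw [pvBDSuccNeg m dy y dx h, PySem.Dict.get?_insert, ih v]
      by_cases hv : v = pvBand m dy y dx
      · rw [if_pos hv]
        have hfv : (List.range dx).find? (fun c => pvBand m dy y c == v) = none := by
          rw [hv]; exact hnone
        have ht : (pvBand m dy y dx == v) = true := by rw [hv]; simp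
        rw [hfv]
        simp [ht]
      · rw [if_neg hv]
        cases hf : (List.range dx).find? (fun c => pvBand m dy y c == v) with
        | some c => simp
        | none =>
          have hne : (pvBand m dy y dx == v) = false := by
            rw [beq_eq_false_iff_ne]
            intro he
            exact hv he.symm
          simp [hne]

def pvSeen (m : List (List Int)) (dy dx y0 : Nat) (seen : List (PySem.Dict Int Int)) : Prop :=
  seen.length = dy ∧
  (∀ y, y < y0 → seen.getD y PySem.Dict.empty = pvBD m dy y (dx+1)) ∧
  (∀ y, y0 ≤ y → y < dy → seen.getD y PySem.Dict.empty = pvBD m dy y dx)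

theorem pvBySpec (m pref : List (List Int))
    (hpref : ∀ r c, r ≤ m.length → c ≤ (m.headD []).length → pvBget pref r c = pvPs m r c)
    (dy dx : Nat) (hdy : dy ≤ m.length) (hdx : dx ≤ (m.headD []).length) :
    ∀ (k y0 : Nat) (seen : List (PySem.Dict Int Int)), y0 + k = dy → pvSeen m dy dx y0 seen →
    ((pvByLoop pref dy dx (List.range' y0 k) seen).2
        = ((List.range' y0 k).findSome? (fun y =>
            ((List.range dx).find? (fun x => pvP m dy dx y x)).map (fun x => (y, x)))).map
              (fun p => ((p.1 : Int), (p.2 : Int))))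
    ∧ ((pvByLoop pref dy dx (List.range' y0 k) seen).2 = none →
        pvSeen m dy dx dy (pvByLoop pref dy dx (List.range' y0 k) seen).1) := by
  intro k
  induction k with
  | zero =>
    intro y0 seen h hS
    have : y0 = dy := by omega
    subst this
    refine ⟨rfl, fun _ => ⟨hS.1, fun y hy => hS.2.1 y hy, fun y h1 h2 => absurd h1 (by omega)⟩⟩
  | succ k ih =>
    intro y0 seen h hS
    obtain ⟨hLen, hDone, hTodo⟩ := hS
    have hy0 : y0 < dy := by omega
    rw [List.range'_succ]
    simp only [pvByLoop]
    have hband : pvBget pref dy dx - pvBget pref y0 dx = pvBand m dy y0 dx := by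
      rw [hpref dy dx hdy hdx, hpref y0 dx (by omega) hdx]; rfl
    have hd : seen.getD y0 PySem.Dict.empty = pvBD m dy y0 dx := hTodo y0 (le_refl _) hy0
    rw [hband, hd]
    have hfind : (List.range dx).find? (fun x => pvP m dy dx y0 x)
        = (List.range dx).find? (fun c => pvBand m dy y0 c == pvBand m dy y0 dx) := by
      apply pvFindCongr
      intro x _
      exact pvPBand m dy dx y0 x
    have hget := pvBDGet m dy y0 dx (pvBand m dy y0 dx)
    have hcont := PySem.Dict.contains_eq_isSome_get? (d := pvBD m dy y0 dx) (k := pvBand m dy y0 dx)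
    rw [List.findSome?_cons]
    cases hf : (List.range dx).find? (fun c => pvBand m dy y0 c == pvBand m dy y0 dx) with
    | some c =>
      have hc : (pvBD m dy y0 dx).contains (pvBand m dy y0 dx) = true := by
        rw [hcont, hget, hf]; rfl
      rw [if_pos hc]
      have hgd : (pvBD m dy y0 dx).getD (pvBand m dy y0 dx) 0 = (c : Int) := by
        rw [PySem.Dict.getD_eq_get?_getD, hget, hf]; rfl
      rw [hgd, hfind, hf]
      exact ⟨by simp, fun hcontra => absurd hcontra (by simp)⟩
    | none =>
      have hc : (pvBD m dy y0 dx).contains (pvBand m dy y0 dx) = false := by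
        rw [hcont, hget, hf]; rfl
      rw [if_neg (by simp [hc])]
      rw [hfind, hf]
      simp only [Option.map_none]
      have hS' : pvSeen m dy dx (y0+1) (seen.set y0 ((pvBD m dy y0 dx).insert (pvBand m dy y0 dx) (dx : Int))) := by
        refine ⟨by simp [hLen], ?_, ?_⟩
        · intro y hy
          rw [pvGetDSet _ y0 y _ _ (by omega)]
          by_cases hyy : y = y0
          · subst hyy
            rw [if_pos rfl, pvBDSuccNeg m dy y dx (by simp [hc])]
          · rw [if_neg hyy]
            exact hDone y (by omega)
        · intro y h1 h2
          rw [pvGetDSet _ y0 y _ _ (by omega), if_neg (by omega)]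
          exact hTodo y (by omega) h2
      exact ih (y0+1) _ (by omega) hS'

theorem pvBdxSpec (m pref : List (List Int))
    (hpref : ∀ r c, r ≤ m.length → c ≤ (m.headD []).length → pvBget pref r c = pvPs m r c)
    (dy : Nat) (_hdy1 : 1 ≤ dy) (hdy : dy ≤ m.length) :
    ∀ (k dx0 : Nat) (seen : List (PySem.Dict Int Int)), 1 ≤ dx0 →
    dx0 + k = (m.headD []).length + 1 →
    seen.length = dy → (∀ y, y < dy → seen.getD y PySem.Dict.empty = pvBD m dy y dx0) →
    pvBdxLoop pref dy (List.range' dx0 k) seen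
      = (List.range' dx0 k).findSome? (fun dx =>
          (pvS m dy dx).map (fun p => [((p.1 : Int), (p.2 : Int)), ((dy : Int) - 1, (dx : Int) - 1)])) := by
  intro k
  induction k with
  | zero => intro dx0 seen _ _ _ _; rfl
  | succ k ih =>
    intro dx0 seen h1 h2 hLen hInv
    rw [List.range'_succ]
    simp only [pvBdxLoop]
    have hdx0 : dx0 ≤ (m.headD []).length := by omega
    have hrange : List.range dy = List.range' 0 dy := List.range_eq_range' ..
    have hby := pvBySpec m pref hpref dy dx0 hdy hdx0 dy 0 seen (by omega)
      ⟨hLen, fun y hy => absurd hy (by omega), fun y _ h2 => hInv y h2⟩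
    rw [← hrange] at hby
    have hS2 : (pvByLoop pref dy dx0 (List.range dy) seen).2
        = (pvS m dy dx0).map (fun p => ((p.1 : Int), (p.2 : Int))) := hby.1
    rw [List.findSome?_cons, hS2]
    cases hS : pvS m dy dx0 with
    | some p =>
      obtain ⟨y, x⟩ := p
      simp
    | none =>
      simp only [Option.map_none]
      have hSeen := hby.2 (by rw [hS2, hS]; rfl)
      exact ih (dx0+1) _ (by omega) (by omega) hSeen.1 (fun y hy => hSeen.2.1 y hy)

theorem pvBDOne (m : List (List Int)) (dy y : Nat) :
    pvBD m dy y 1 = PySem.Dict.empty.insert (0 : Int) (0 : Int) := by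
  have hb : pvBand m dy y 0 = 0 := by
    unfold pvBand; rw [pvPsZero, pvPsZero]; rfl
  simp only [pvBD, hb]
  rw [if_neg (by simp [PySem.Dict.contains_empty])]
  norm_num

theorem pvBdySpec (m pref : List (List Int))
    (hpref : ∀ r c, r ≤ m.length → c ≤ (m.headD []).length → pvBget pref r c = pvPs m r c) :
    ∀ (k dy0 : Nat), 1 ≤ dy0 → dy0 + k = m.length + 1 →
    pvBdyLoop pref (m.headD []).length (List.range' dy0 k)
      = (List.range' dy0 k).findSome? (fun dy =>
          (List.range' 1 (m.headD []).length).findSome? (fun dx =>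
            (pvS m dy dx).map (fun p => [((p.1 : Int), (p.2 : Int)), ((dy : Int) - 1, (dx : Int) - 1)]))) := by
  intro k
  induction k with
  | zero => intro dy0 _ _; rfl
  | succ k ih =>
    intro dy0 h1 h2
    rw [List.range'_succ]
    simp only [pvBdyLoop]
    have hInv : ∀ y, y < dy0 →
        (List.replicate dy0 (PySem.Dict.empty.insert (0:Int) (0:Int))).getD y PySem.Dict.empty
          = pvBD m dy0 y 1 := by
      intro y hy
      rw [pvBDOne]
      rw [List.getD, List.getElem?_replicate, if_pos hy]
      rfl
    have hdx := pvBdxSpec m pref hpref dy0 h1 (by omega) (m.headD []).length 1 _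
      (le_refl _) (by omega) (by simp) hInv
    rw [hdx, List.findSome?_cons]
    cases hres : (List.range' 1 (m.headD []).length).findSome? (fun dx =>
        (pvS m dy0 dx).map (fun p => [((p.1 : Int), (p.2 : Int)), ((dy0 : Int) - 1, (dx : Int) - 1)])) with
    | some r => rfl
    | none => exact ih (dy0+1) (by omega) (by omega)

theorem pvBEqHit (m : List (List Int)) (hm : m ≠ []) : submatrixSum2_alt m = pvHit m := by
  have hinit : [List.replicate ((m.headD []).length + 1) (0:Int)]
      = (List.range (0+1)).map (pvProw m) := by
    have hrow : pvProw m 0 = List.replicate ((m.headD []).length + 1) (0:Int) := by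
      unfold pvProw
      apply List.eq_replicate_iff.mpr
      refine ⟨by simp, ?_⟩
      intro b hb
      obtain ⟨c, -, hcb⟩ := List.mem_map.1 hb
      rw [← hcb]; rfl
    rw [show List.range (0+1) = [0] from rfl, List.map_cons, List.map_nil, hrow]
  have hpref : pvBprefLoop m (m.headD []).length (List.range m.length)
      [List.replicate ((m.headD []).length + 1) (0:Int)]
      = (List.range (m.length+1)).map (pvProw m) := by
    rw [List.range_eq_range']
    exact pvBprefSpec m m.length 0 _ hinit (by omega)
  have hrest := pvBdySpec m _ (fun r c hr hc => pvPrefGet m r c hr hc) m.length 1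
    (le_refl _) (by omega)
  unfold submatrixSum2_alt pvHit
  rw [if_neg hm]
  show pvBdyLoop (pvBprefLoop m (m.headD []).length (List.range m.length)
      [List.replicate ((m.headD []).length + 1) (0:Int)]) (m.headD []).length
      (List.range' 1 m.length) = _
  rw [hpref]
  exact hrest

-- ===== VERDICT (by name: the statement is the Claim_ definition above) =====
theorem submatrixSum2_spec : Claim_equal_submatrixSum2 := by
  intro m _dom _pre
  unfold Spec_submatrixSum2
  by_cases hm : m = []
  · subst hm; rfl
  · rw [pvAEqHit m hm, pvBEqHit m hm]
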